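-- pv_equiv track=rewrite | github.com/denismakogon/pynfv | pynfv/vyatta/vrouter/processor.py | _get_config_block
-- ===== SOURCE A (Python) =====
-- def _get_config_block(input_str, search_str):
--     if search_str is not None:
--         index = search_str.find(input_str)
--         if index >= 0:
--             block_start = search_str[index + len(input_str):]
--             block_str = []
--             for line in block_start.split('\n'):
--                 if line.startswith('}'):
--                     break
--                 block_str.append(line)
--             return ''.join(block_str)
-- ===== SOURCE B (Python) =====
-- def _get_config_block(input_str, search_str):
--     if search_str is None:
--         return None
--     index = search_str.find(input_str)
--     if index < 0:
--         return None
--     block = search_str[index + len(input_str):]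
--     if block.startswith('}'):
--         return ''
--     end = block.find('\n}')
--     if end != -1:
--         block = block[:end]
--     return block.replace('\n', '')
-- ===== Notes on version B (the rewrite author's own statement) =====
-- stated objective: simpler
-- what changed: B drops A's split-into-lines loop with break and join: it finds the first "\n}" in the tail directly, slices up to it (empty result if the tail itself starts with '}'), and strips newlines with replace.
import Mathlib
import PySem

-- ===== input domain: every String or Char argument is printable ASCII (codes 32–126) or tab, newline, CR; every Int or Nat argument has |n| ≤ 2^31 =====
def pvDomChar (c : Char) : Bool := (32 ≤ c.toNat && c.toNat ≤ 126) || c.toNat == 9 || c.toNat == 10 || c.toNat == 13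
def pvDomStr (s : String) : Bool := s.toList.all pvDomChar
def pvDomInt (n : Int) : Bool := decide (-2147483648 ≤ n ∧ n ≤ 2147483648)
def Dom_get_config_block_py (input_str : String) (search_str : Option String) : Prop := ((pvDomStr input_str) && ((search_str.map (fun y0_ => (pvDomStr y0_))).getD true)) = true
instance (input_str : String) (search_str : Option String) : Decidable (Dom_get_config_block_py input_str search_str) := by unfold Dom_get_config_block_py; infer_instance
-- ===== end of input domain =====

-- B replaces A's split-lines/break loop by direct string searching (find the first "\n}" and
-- slice up to it); objective: simpler (no faster: same asymptotic cost, timing advisory).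

-- ===== PORT A =====
def get_config_block_py (input_str : String) (search_str : Option String) : Option String :=
  match search_str with
  | none => none
  | some s =>
    let index := PySem.Str.find s input_str
    if index ≥ 0 then
      let block_start := PySem.Str.slice s (some (index + PySem.Str.len input_str)) none
      -- for line in block_start.split('\n'): break on a line starting with '}', else append
      let lines := PySem.Chars.splitOn block_start.toList ['\n']
      let block_str := lines.takeWhile (fun line => !PySem.Chars.startswith line ['}'])
      -- return ''.join(block_str)
      some (String.ofList (PySem.Chars.join [] block_str))
    else none

-- ===== PORT B =====
def get_config_block_py_alt (input_str : String) (search_str : Option String) : Option String :=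
  match search_str with
  | none => none
  | some s =>
    let index := PySem.Str.find s input_str
    if index < 0 then none
    else
      let block := PySem.Str.slice s (some (index + PySem.Str.len input_str)) none
      if PySem.Str.startswith block "}" then some ""
      else
        let e := PySem.Str.find block "\n}"
        let block2 := if e ≠ -1 then PySem.Str.slice block none (some e) else block
        some (PySem.Str.replace block2 "\n" "")

-- ===== PRECONDITION & SPEC =====
def Spec_get_config_block_py (input_str : String) (search_str : Option String) (out : Option String) : Prop := out = get_config_block_py_alt input_str search_str
instance (input_str : String) (search_str : Option String) (out : Option String) : Decidable (Spec_get_config_block_py input_str search_str out) := by unfold Spec_get_config_block_py; infer_instance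

-- ===== CLAIM (what is proved, stated in full; the proofs are below) =====
def Claim_equal_get_config_block_py : Prop := ∀ (input_str : String) (search_str : Option String), Dom_get_config_block_py input_str search_str → Spec_get_config_block_py input_str search_str (get_config_block_py input_str search_str)

-- ===== LEMMAS AND PROOFS =====

-- `find.go` returns -1 or a value ≥ its running counter.
theorem pvFindGo_cases (sub l : List Char) (k : Nat) :
    PySem.Chars.find.go sub l k = -1 ∨ 0 ≤ PySem.Chars.find.go sub l k := by
  induction l generalizing k with
  | nil => by_cases h : sub.isEmpty <;> simp [PySem.Chars.find.go, h]
  | cons c t ih =>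
    by_cases h : sub.isPrefixOf (c :: t) <;> simp [PySem.Chars.find.go, h]
    exact ih (k + 1)

-- offset form of find.go
theorem pvFindGo_offset (sub l : List Char) (k : Nat) :
    PySem.Chars.find.go sub l k =
      if PySem.Chars.find.go sub l 0 = -1 then -1 else PySem.Chars.find.go sub l 0 + k := by
  induction l generalizing k with
  | nil =>
    by_cases h : sub.isEmpty <;> simp [PySem.Chars.find.go, h]
  | cons c t ih =>
    by_cases h : sub.isPrefixOf (c :: t)
    · simp [PySem.Chars.find.go, h]
    · simp only [PySem.Chars.find.go, h]
      rw [ih (k + 1), ih 1]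
      rcases pvFindGo_cases sub t 0 with h0 | h0 <;>
        (push_cast; split_ifs <;> omega)

-- no newline in cs → "\n}" not found
theorem pvFindGo_no_nl (cs : List Char) (h : '\n' ∉ cs) (k : Nat) :
    PySem.Chars.find.go ['\n', '}'] cs k = -1 := by
  induction cs generalizing k with
  | nil => simp [PySem.Chars.find.go]
  | cons c t ih =>
    have hc : c ≠ '\n' := by intro he; exact h (he ▸ List.mem_cons_self)
    have hp : List.isPrefixOf ['\n', '}'] (c :: t) = false := by
      simp [List.isPrefixOf]; intro he; exact absurd he.symm hc
    simp [PySem.Chars.find.go, hp]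
    exact ih (fun hm => h (List.mem_cons_of_mem _ hm)) (k + 1)

-- find over L ++ '\n' :: r with L newline-free
theorem pvFindGo_line (L r : List Char) (h : '\n' ∉ L) (k : Nat) :
    PySem.Chars.find.go ['\n', '}'] (L ++ '\n' :: r) k =
      if List.isPrefixOf ['}'] r then ((k : Int) + L.length)
      else PySem.Chars.find.go ['\n', '}'] r (k + L.length + 1) := by
  induction L generalizing k with
  | nil =>
    have : List.isPrefixOf ['\n', '}'] ('\n' :: r) = List.isPrefixOf ['}'] r := by
      simp [List.isPrefixOf]
    by_cases hp : List.isPrefixOf ['}'] r <;>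
      simp [PySem.Chars.find.go, this, hp]
  | cons c L ih =>
    have hc : c ≠ '\n' := by intro he; exact h (he ▸ List.mem_cons_self)
    have hp : List.isPrefixOf ['\n', '}'] (c :: (L ++ '\n' :: r)) = false := by
      simp [List.isPrefixOf]; intro he; exact absurd he.symm hc
    simp only [List.cons_append, PySem.Chars.find.go, hp]
    rw [ih (fun hm => h (List.mem_cons_of_mem _ hm)) (k + 1)]
    by_cases hq : List.isPrefixOf ['}'] r <;> simp [hq]
    · ring
    · have : k + 1 + L.length + 1 = k + (L.length + 1) + 1 := by omega
      rw [this]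

-- my structural model of split('\n')
def pvSplit : List Char → List (List Char)
  | [] => [[]]
  | c :: r => if c = '\n' then [] :: pvSplit r else (pvSplit r).modifyHead (fun x => c :: x)

theorem pvSplit_ne_nil (cs : List Char) : pvSplit cs ≠ [] := by
  cases cs with
  | nil => simp [pvSplit]
  | cons c r =>
    by_cases h : c = '\n' <;> simp [pvSplit, h]
    cases hr : pvSplit r with
    | nil => exact absurd hr (pvSplit_ne_nil r)
    | cons a b => simp

theorem pvSplitOnGo (fuel : Nat) (l cur : List Char) (acc : List (List Char))
    (h : l.length ≤ fuel) :
    PySem.Chars.splitOn.go ['\n'] fuel l cur acc =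
      acc.reverse ++ List.modifyHead (fun x => cur.reverse ++ x) (pvSplit l) := by
  induction fuel generalizing l cur acc with
  | zero =>
    cases l with
    | nil => simp [PySem.Chars.splitOn.go, pvSplit]
    | cons c t => simp at h
  | succ fuel ih =>
    cases l with
    | nil => simp [PySem.Chars.splitOn.go, pvSplit]
    | cons c t =>
      simp only [List.length_cons, Nat.add_le_add_iff_right] at h
      by_cases hc : c = '\n'
      · have hp : List.isPrefixOf ['\n'] (c :: t) = true := by simp [List.isPrefixOf, hc]
        simp only [PySem.Chars.splitOn.go, hp, if_true]
        have hd : List.drop ['\n'].length (c :: t) = t := rfl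
        rw [hd, ih t [] (cur.reverse :: acc) h]
        simp only [pvSplit, hc, if_true, List.reverse_nil, List.reverse_cons,
          List.modifyHead_cons, List.append_assoc, List.nil_append,
          List.singleton_append, List.append_nil]
        rw [show (fun x : List Char => x) = id from rfl, List.modifyHead_id, id]
      · have hp : List.isPrefixOf ['\n'] (c :: t) = false := by
          simp [List.isPrefixOf]; intro he; exact absurd he.symm hc
        simp only [PySem.Chars.splitOn.go, hp]
        rw [ih t (c :: cur) acc h]
        simp only [pvSplit, hc, if_false]
        cases hr : pvSplit t with
        | nil => exact absurd hr (pvSplit_ne_nil t)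
        | cons a b => simp

theorem pvSplitOn_eq (cs : List Char) : PySem.Chars.splitOn cs ['\n'] = pvSplit cs := by
  unfold PySem.Chars.splitOn
  rw [pvSplitOnGo (cs.length + 1) cs [] [] (by omega)]
  cases hr : pvSplit cs with
  | nil => exact absurd hr (pvSplit_ne_nil cs)
  | cons a b => simp

theorem pvSplit_no_nl (cs : List Char) (h : '\n' ∉ cs) : pvSplit cs = [cs] := by
  induction cs with
  | nil => rfl
  | cons c t ih =>
    have hc : c ≠ '\n' := by intro he; exact h (he ▸ List.mem_cons_self)
    simp [pvSplit, hc, ih (fun hm => h (List.mem_cons_of_mem _ hm))]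

theorem pvSplit_line (L r : List Char) (h : '\n' ∉ L) :
    pvSplit (L ++ '\n' :: r) = L :: pvSplit r := by
  induction L with
  | nil => simp [pvSplit]
  | cons c L ih =>
    have hc : c ≠ '\n' := by intro he; exact h (he ▸ List.mem_cons_self)
    simp [pvSplit, hc, ih (fun hm => h (List.mem_cons_of_mem _ hm))]

-- replace(cs, "\n", "") is filter
theorem pvReplaceGo (fuel : Nat) (l acc : List Char) (h : l.length ≤ fuel) :
    PySem.Chars.replace.go ['\n'] [] fuel l acc =
      acc.reverse ++ l.filter (fun c => c ≠ '\n') := by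
  induction fuel generalizing l acc with
  | zero =>
    cases l with
    | nil => simp [PySem.Chars.replace.go]
    | cons c t => simp at h
  | succ fuel ih =>
    cases l with
    | nil => simp [PySem.Chars.replace.go]
    | cons c t =>
      simp only [List.length_cons, Nat.add_le_add_iff_right] at h
      by_cases hc : c = '\n'
      · have hp : List.isPrefixOf ['\n'] (c :: t) = true := by simp [List.isPrefixOf, hc]
        simp only [PySem.Chars.replace.go, hp, if_true]
        have hd : List.drop ['\n'].length (c :: t) = t := rfl
        have ha : ([] : List Char).reverse ++ acc = acc := rfl
        rw [hd, ha, ih t acc h]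
        simp [hc]
      · have hp : List.isPrefixOf ['\n'] (c :: t) = false := by
          simp [List.isPrefixOf]; intro he; exact absurd he.symm hc
        simp only [PySem.Chars.replace.go, hp]
        rw [ih t (c :: acc) h]
        simp [hc]

theorem pvReplace_nl (cs : List Char) :
    PySem.Chars.replace cs ['\n'] [] = cs.filter (fun c => c ≠ '\n') := by
  unfold PySem.Chars.replace
  rw [if_neg (by simp), pvReplaceGo cs.length cs [] (le_refl _)]
  simp

theorem pvJoin_nil (l : List (List Char)) : PySem.Chars.join [] l = l.flatten := by
  unfold PySem.Chars.join List.intercalate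
  induction l with
  | nil => rfl
  | cons h t ih => cases t <;> simp_all [List.intersperse]

-- the heart: join of lines-before-'}' equals slice-to-first-"\n}" with newlines removed
theorem pvStartswith_line (L r : List Char) :
    PySem.Chars.startswith (L ++ '\n' :: r) ['}'] = PySem.Chars.startswith L ['}'] := by
  cases L with
  | nil => simp [PySem.Chars.startswith, List.isPrefixOf]
  | cons a t => simp [PySem.Chars.startswith, List.isPrefixOf]

theorem pvMain (cs : List Char) :
    PySem.Chars.join [] ((pvSplit cs).takeWhile (fun l => !PySem.Chars.startswith l ['}'])) =
      (if PySem.Chars.startswith cs ['}'] then [] else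
        (if PySem.Chars.find cs ['\n', '}'] = -1 then cs
         else cs.take (PySem.Chars.find cs ['\n', '}']).toNat).filter (fun c => c ≠ '\n')) := by
  generalize hn : cs.length = n
  induction n using Nat.strong_induction_on generalizing cs with
  | _ n ih =>
  have hLR := List.takeWhile_append_dropWhile (p := fun c : Char => c != '\n') (l := cs)
  have hnlL : '\n' ∉ cs.takeWhile (fun c : Char => c != '\n') := by
    intro hm
    have := List.mem_takeWhile_imp hm
    simp at this
  cases hD : cs.dropWhile (fun c : Char => c != '\n') with
  | nil =>
    have hcs : cs.takeWhile (fun c : Char => c != '\n') = cs := by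
      rw [hD, List.append_nil] at hLR
      exact hLR
    have hnl : '\n' ∉ cs := by rw [← hcs]; exact hnlL
    rw [pvSplit_no_nl cs hnl]
    have hfind : PySem.Chars.find cs ['\n', '}'] = -1 := by
      simp only [PySem.Chars.find]; exact pvFindGo_no_nl cs hnl 0
    by_cases hb : PySem.Chars.startswith cs ['}']
    · simp [hb, List.takeWhile]
    · simp only [hb, hfind, if_true]
      have : (fun l => !PySem.Chars.startswith l ['}']) cs = true := by simp [hb]
      simp only [List.takeWhile, this, pvJoin_nil, Bool.false_eq_true, List.flatten]
      rw [List.filter_eq_self.mpr]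
      · simp
      · intro a ha
        simp only [decide_eq_true_eq]
        intro he
        exact hnl (he ▸ ha)
  | cons d r =>
    have hdr : cs.dropWhile (fun c : Char => c != '\n') ≠ [] := by rw [hD]; simp
    have hd : d = '\n' := by
      have := List.head_dropWhile_not (fun c : Char => c != '\n') hdr
      simp only [hD, List.head_cons] at this
      simpa using this
    subst hd
    set L := cs.takeWhile (fun c : Char => c != '\n') with hLdef
    have hcs : L ++ '\n' :: r = cs := by rw [← hLR, hD]
    have hlen : L.length + 1 + r.length = n := by
      rw [← hn, ← hcs]; simp; omega
    rw [← hcs, pvSplit_line L r hnlL, pvStartswith_line L r]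
    have hfind : PySem.Chars.find (L ++ '\n' :: r) ['\n', '}'] =
        (if List.isPrefixOf ['}'] r then ((0 : Int) + L.length)
         else PySem.Chars.find.go ['\n', '}'] r (0 + L.length + 1)) := by
      simp only [PySem.Chars.find]
      exact pvFindGo_line L r hnlL 0
    have ihr := ih r.length (by omega) r rfl
    by_cases hb : PySem.Chars.startswith L ['}']
    · simp [hb, List.takeWhile]
    · have hkeep : (fun l => !PySem.Chars.startswith l ['}']) L = true := by simp [hb]
      simp only [List.takeWhile_cons, hb, Bool.not_false, if_true, Bool.false_eq_true, if_false]
      rw [pvJoin_nil, List.flatten_cons, ← pvJoin_nil]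
      have hfL : List.filter (fun c : Char => decide (c ≠ '\n')) L = L := by
        rw [List.filter_eq_self]
        intro a ha
        simp only [decide_eq_true_eq]
        exact fun he => hnlL (he ▸ ha)
      have hnlc : ¬ (decide (('\n' : Char) ≠ '\n') = true) := by simp
      by_cases hr : List.isPrefixOf ['}'] r
      · -- first "\n}" is right after L; B keeps exactly L
        have hbr : PySem.Chars.startswith r ['}'] = true := by
          show List.isPrefixOf ['}'] r = true
          exact hr
        rw [ihr, hbr]
        simp only [if_true, List.append_nil]
        rw [hfind, if_pos hr]
        have hne : ((0 : Int) + L.length) ≠ -1 := by omega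
        rw [if_neg hne]
        have htn : ((0 : Int) + L.length).toNat = L.length := by omega
        rw [htn, List.take_left, hfL]
      · have hbr : PySem.Chars.startswith r ['}'] = false := by
          show List.isPrefixOf ['}'] r = false
          exact Bool.eq_false_iff.mpr hr
        have hoff := pvFindGo_offset ['\n', '}'] r (0 + L.length + 1)
        have hfr : PySem.Chars.find r ['\n', '}'] = PySem.Chars.find.go ['\n', '}'] r 0 := rfl
        rw [ihr, hbr]
        simp only [Bool.false_eq_true, if_false]
        rcases pvFindGo_cases ['\n', '}'] r 0 with h0 | h0
        · -- no "\n}" anywhere: both keep everything (newlines removed)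
          rw [hfind, if_neg hr, hoff, if_pos h0, hfr, h0, if_pos rfl, if_pos rfl]
          rw [List.filter_append, List.filter_cons_of_neg (p := fun c : Char => decide (c ≠ '\n')) hnlc, hfL]
        · have h0ne : PySem.Chars.find.go ['\n', '}'] r 0 ≠ -1 := by omega
          rw [hfind, if_neg hr, hoff, if_neg h0ne]
          have hne2 : PySem.Chars.find.go ['\n', '}'] r 0 + ((0 : Nat) + L.length + 1 : Nat) ≠ -1 := by
            push_cast; omega
          rw [if_neg hne2, hfr, if_neg h0ne]
          have htn : (PySem.Chars.find.go ['\n', '}'] r 0 + ((0 : Nat) + L.length + 1 : Nat)).toNat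
              = L.length + (1 + (PySem.Chars.find.go ['\n', '}'] r 0).toNat) := by
            push_cast; omega
          rw [htn, List.take_append]
          have h1 : List.take (L.length + (1 + (PySem.Chars.find.go ['\n', '}'] r 0).toNat)) L = L := by
            apply List.take_of_length_le; omega
          have h2 : L.length + (1 + (PySem.Chars.find.go ['\n', '}'] r 0).toNat) - L.length
              = 1 + (PySem.Chars.find.go ['\n', '}'] r 0).toNat := by omega
          have h3 : List.take (1 + (PySem.Chars.find.go ['\n', '}'] r 0).toNat) ('\n' :: r)
              = '\n' :: List.take (PySem.Chars.find.go ['\n', '}'] r 0).toNat r := by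
            rw [Nat.add_comm]; rfl
          rw [h1, h2, h3]
          rw [List.filter_append, List.filter_cons_of_neg (p := fun c : Char => decide (c ≠ '\n')) hnlc, hfL]

-- ===== VERDICT (by name: the statement is the Claim_ definition above) =====
theorem pvBridge (b : String) :
    some (String.ofList (PySem.Chars.join []
        ((PySem.Chars.splitOn b.toList ['\n']).takeWhile (fun l => !PySem.Chars.startswith l ['}'])))) =
      (if PySem.Str.startswith b "}" then some ""
       else some (PySem.Str.replace
         (if PySem.Str.find b "\n}" ≠ -1 then PySem.Str.slice b none (some (PySem.Str.find b "\n}")) else b)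
         "\n" "")) := by
  have h1 : ("}" : String).toList = ['}'] := by decide
  have h2 : ("\n}" : String).toList = ['\n', '}'] := by decide
  have h3 : ("\n" : String).toList = ['\n'] := by decide
  have h4 : ("" : String).toList = ([] : List Char) := by decide
  have hsw : PySem.Str.startswith b "}" = PySem.Chars.startswith b.toList ['}'] := by
    rw [PySem.Str.startswith_eq, h1]
  have hfd : PySem.Str.find b "\n}" = PySem.Chars.find b.toList ['\n', '}'] := by
    rw [PySem.Str.find_eq, h2]
  rw [pvSplitOn_eq]
  have hmain := pvMain b.toList
  by_cases hb : PySem.Chars.startswith b.toList ['}']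
  · rw [hb, if_pos rfl] at hmain
    rw [hmain, hsw, hb, if_pos rfl]
  · have hbf : PySem.Chars.startswith b.toList ['}'] = false := Bool.eq_false_iff.mpr hb
    rw [hbf] at hmain
    simp only [Bool.false_eq_true, if_false] at hmain
    rw [hmain, hsw, hbf]
    simp only [Bool.false_eq_true, if_false]
    by_cases he : PySem.Str.find b "\n}" = -1
    · have he' : PySem.Chars.find b.toList ['\n', '}'] = -1 := by rw [← hfd]; exact he
      rw [he', if_pos rfl]
      simp only [he, ne_eq, not_true_eq_false, if_false]
      have hx : (PySem.Str.replace b "\n" "").toList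
          = List.filter (fun c => decide (c ≠ '\n')) b.toList := by
        rw [PySem.Str.toList_replace, h3, h4, pvReplace_nl]
      rw [← String.ofList_toList (s := PySem.Str.replace b "\n" ""), hx]
    · have he' : PySem.Chars.find b.toList ['\n', '}'] ≠ -1 := by rw [← hfd]; exact he
      have hge : 0 ≤ PySem.Chars.find b.toList ['\n', '}'] := by
        rcases pvFindGo_cases ['\n', '}'] b.toList 0 with h0 | h0
        · exact absurd h0 he'
        · exact h0
      rw [if_neg he']
      simp only [he, ne_eq, not_false_eq_true, if_true]
      have hx : (PySem.Str.replace (PySem.Str.slice b none (some (PySem.Str.find b "\n}"))) "\n" "").toList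
          = List.filter (fun c => decide (c ≠ '\n'))
              (List.take (PySem.Chars.find b.toList ['\n', '}']).toNat b.toList) := by
        rw [PySem.Str.toList_replace, h3, h4, pvReplace_nl, PySem.Str.toList_slice,
          PySem.Chars.slice_eq_listSlice, hfd, PySem.List.slice_to _ hge]
      rw [← String.ofList_toList
            (s := PySem.Str.replace (PySem.Str.slice b none (some (PySem.Str.find b "\n}"))) "\n" ""), hx]

theorem get_config_block_py_spec : Claim_equal_get_config_block_py := by
  intro input_str search_str _
  unfold Spec_get_config_block_py get_config_block_py get_config_block_py_alt
  cases search_str with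
  | none => rfl
  | some s =>
    dsimp only
    by_cases hi : PySem.Str.find s input_str ≥ 0
    · rw [if_pos hi, if_neg (by omega)]
      exact pvBridge _
    · rw [if_neg hi, if_pos (by omega)]
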